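-- pv_equiv track=rewrite | github.com/RahulKB31/Python-Challenge-Codes | p13.py | computeLastDigit
-- ===== SOURCE A (Python) =====
-- def computeLastDigit(A,B):
--     variable = 1
--     if (A == B):
--         return 1
--
--     # if difference (B-A) >= 5, answer = 0
--     elif ((B-A) >= 5):
--         return 0
--
--     else:
--         for i in range(A+1, B+1):
--             variable = (variable * (i % 10)) % 10
--
--         return variable % 10
-- ===== SOURCE B (Python) =====
-- def _build_table():
--     table = []
--     for r in range(10):
--         row = [1]
--         for d in range(1, 5):
--             row.append((row[-1] * ((r + d) % 10)) % 10)
--         table.append(row)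
--     return table
--
-- _TABLE = _build_table()
--
-- def computeLastDigit(A, B):
--     d = B - A
--     if d < 0:
--         return 1
--     if d >= 5:
--         return 0
--     return _TABLE[A % 10][d]
-- ===== Notes on version B (the rewrite author's own statement) =====
-- stated objective: alternative
-- what changed: Replaces A's special-case branches plus a per-call multiply-mod loop by a 10x5 table of last digits precomputed once at module load, so each call is a pure arithmetic guard plus one table lookup at (A % 10, B - A).
import Mathlib
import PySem

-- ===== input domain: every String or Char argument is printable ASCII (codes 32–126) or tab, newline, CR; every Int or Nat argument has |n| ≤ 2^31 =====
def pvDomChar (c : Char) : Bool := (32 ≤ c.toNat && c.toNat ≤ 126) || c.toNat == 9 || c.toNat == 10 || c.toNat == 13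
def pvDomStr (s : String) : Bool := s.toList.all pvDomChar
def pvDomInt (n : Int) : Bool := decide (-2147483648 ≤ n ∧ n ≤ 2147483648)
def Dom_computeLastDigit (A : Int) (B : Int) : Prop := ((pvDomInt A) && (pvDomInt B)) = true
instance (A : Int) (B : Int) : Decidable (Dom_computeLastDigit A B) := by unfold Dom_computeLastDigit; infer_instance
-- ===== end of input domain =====

-- B replaces A's guard clauses + per-call loop by a precomputed 10×5 last-digit table indexed by (A % 10, B − A): an alternative O(1)-per-call structure with the same values.


-- ===== PORT A =====
def computeLastDigit (A : Int) (B : Int) : Int :=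
  if A = B then 1
  else if B - A ≥ 5 then 0
  else
    PySem.Int.mod
      ((PySem.List.pyRange (A + 1) (B + 1) 1).foldl
        (fun v i => PySem.Int.mod (v * PySem.Int.mod i 10) 10) 1) 10

-- ===== PORT B =====
-- module-level helper _build_table of Source B (row[-1] ported with pyGet?; it never misses on a non-empty row)
def pvBuildTable : List (List Int) :=
  (PySem.List.pyRange 0 10 1).foldl
    (fun table r =>
      let row := (PySem.List.pyRange 1 5 1).foldl
        (fun row d =>
          row ++ [PySem.Int.mod ((PySem.List.pyGet? row (-1)).getD 0 * PySem.Int.mod (r + d) 10) 10])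
        [1]
      table ++ [row]) []

def computeLastDigit_alt (A : Int) (B : Int) : Int :=
  let d := B - A
  if d < 0 then 1
  else if d ≥ 5 then 0
  else (PySem.List.pyGet? ((PySem.List.pyGet? pvBuildTable (PySem.Int.mod A 10)).getD []) d).getD 0

-- ===== PRECONDITION & SPEC =====
def Spec_computeLastDigit (A : Int) (B : Int) (out : Int) : Prop := out = computeLastDigit_alt A B
instance (A : Int) (B : Int) (out : Int) : Decidable (Spec_computeLastDigit A B out) := by unfold Spec_computeLastDigit; infer_instance

-- ===== CLAIM (what is proved, stated in full; the proofs are below) =====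
def Claim_equal_computeLastDigit : Prop := ∀ (A : Int) (B : Int), Dom_computeLastDigit A B → Spec_computeLastDigit A B (computeLastDigit A B)

-- ===== LEMMAS AND PROOFS =====

-- A's loop body only sees i through i % 10: shifting the whole range by a multiple of 10 keeps the fold
theorem pv_shift (n : Nat) : ∀ (a b v : Int), a % 10 = b % 10 →
    (PySem.List.pyRange a (a + n) 1).foldl (fun v i => PySem.Int.mod (v * PySem.Int.mod i 10) 10) v
  = (PySem.List.pyRange b (b + n) 1).foldl (fun v i => PySem.Int.mod (v * PySem.Int.mod i 10) 10) v := by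
  induction n with
  | zero => intro a b v h; simp [PySem.List.pyRange_one_eq_nil]
  | succ n ih =>
    intro a b v h
    push_cast
    rw [PySem.List.pyRange_one_cons (by omega : a < a + ((n:Int)+1)),
        PySem.List.pyRange_one_cons (by omega : b < b + ((n:Int)+1))]
    simp only [List.foldl_cons]
    have hma : PySem.Int.mod a 10 = PySem.Int.mod b 10 := by
      rw [PySem.Int.mod_eq_emod_of_pos (by norm_num), PySem.Int.mod_eq_emod_of_pos (by norm_num), h]
    rw [hma]
    have := ih (a+1) (b+1) (PySem.Int.mod (v * PySem.Int.mod b 10) 10) (by omega)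
    have ha : a + ((n:Int)+1) = (a+1) + (n:Int) := by ring
    have hb : b + ((n:Int)+1) = (b+1) + (n:Int) := by ring
    push_cast at *
    rw [ha, hb]
    exact this

-- the table entry at (r, d) is exactly A's fold over the range r+1 … r+d, last digit taken
theorem pv_table (r d : Int) (hr0 : 0 ≤ r) (hr1 : r < 10) (hd0 : 0 ≤ d) (hd1 : d < 5) :
    (PySem.List.pyGet? ((PySem.List.pyGet? pvBuildTable r).getD []) d).getD 0
  = PySem.Int.mod
      ((PySem.List.pyRange (r + 1) (r + d + 1) 1).foldl
        (fun v i => PySem.Int.mod (v * PySem.Int.mod i 10) 10) 1) 10 := by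
  interval_cases r <;> interval_cases d <;> decide

-- ===== VERDICT (by name: the statement is the Claim_ definition above) =====
theorem computeLastDigit_spec : Claim_equal_computeLastDigit := by
  intro A B _
  unfold Spec_computeLastDigit computeLastDigit computeLastDigit_alt
  have hmodA : PySem.Int.mod A 10 = A % 10 := PySem.Int.mod_eq_emod_of_pos (by norm_num)
  have hr0 : 0 ≤ A % 10 := Int.emod_nonneg A (by norm_num)
  have hr1 : A % 10 < 10 := Int.emod_lt_of_pos A (by norm_num)
  by_cases hAB : A = B
  · subst hAB
    rw [if_pos rfl, if_neg (by omega : ¬ A - A < 0), if_neg (by omega : ¬ A - A ≥ 5), hmodA,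
        pv_table (A % 10) (A - A) hr0 hr1 (by omega) (by omega),
        show A % 10 + (A - A) + 1 = A % 10 + 1 by ring,
        PySem.List.pyRange_one_eq_nil (le_refl (A % 10 + 1))]
    decide
  · rw [if_neg hAB]
    by_cases h5 : B - A ≥ 5
    · rw [if_pos h5, if_neg (by omega : ¬ B - A < 0), if_pos h5]
    · rw [if_neg h5]
      by_cases hneg : B - A < 0
      · rw [if_pos hneg, PySem.List.pyRange_one_eq_nil (by omega : B + 1 ≤ A + 1)]
        decide
      · rw [if_neg hneg, if_neg h5, hmodA,
            pv_table (A % 10) (B - A) hr0 hr1 (by omega) (by omega)]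
        have hn : B + 1 = (A + 1) + ((B - A).toNat : Int) := by omega
        have hn2 : A % 10 + (B - A) + 1 = (A % 10 + 1) + ((B - A).toNat : Int) := by omega
        rw [hn, hn2, pv_shift (B - A).toNat (A + 1) (A % 10 + 1) 1 (by omega)]
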